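-- pv_equiv track=rewrite | github.com/Mrinank-Bhowmick/python-beginner-projects | projects/Password Meter/meter_pass.py | sequentialLetters
-- ===== SOURCE A (Python) =====
-- import string
--
-- sequenceAlphabet = string.ascii_lowercase
--
-- def sequentialLetters(password):
--     letters = ""
--     countLetters = 0
--
--     for i in range(len(password)):
--         letters += password[i : i + 3]
--
--         if letters in sequenceAlphabet and len(letters) == 3:
--             countLetters += 1
--
--         letters = ""
--
--     return (countLetters * 3) * -1
-- ===== SOURCE B (Python) =====
-- def sequentialLetters(password):
--     run = 0
--     prev = None
--     count = 0
--     for ch in password: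
--         o = ord(ch)
--         if 97 <= o <= 122 and prev is not None and 97 <= ord(prev) <= 122 and o == ord(prev) + 1:
--             run += 1
--         elif 97 <= o <= 122:
--             run = 1
--         else:
--             run = 0
--         if run >= 3:
--             count += 1
--         prev = ch
--     return count * 3 * -1
-- ===== Notes on version B (the rewrite author's own statement) =====
-- stated objective: alternative
-- what changed: Replaced A's per-index slicing of a 3-character window and substring-membership test against the alphabet string by a single running-state scan that maintains the length of the current ascending-lowercase run and counts every position where the run reaches 3.
import Mathlib
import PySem

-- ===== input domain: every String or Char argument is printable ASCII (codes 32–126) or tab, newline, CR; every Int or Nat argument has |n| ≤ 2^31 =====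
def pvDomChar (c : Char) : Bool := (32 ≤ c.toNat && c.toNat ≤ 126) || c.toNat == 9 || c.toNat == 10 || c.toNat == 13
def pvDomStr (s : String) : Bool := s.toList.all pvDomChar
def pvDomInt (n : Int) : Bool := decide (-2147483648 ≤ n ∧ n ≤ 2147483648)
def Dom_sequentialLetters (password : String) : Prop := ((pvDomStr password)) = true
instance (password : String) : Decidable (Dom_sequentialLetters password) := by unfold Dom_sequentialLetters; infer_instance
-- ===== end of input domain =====

-- B replaces A's per-index substring-of-the-alphabet window test by a single running-state scan
-- (run length of the current ascending lowercase chain); objective: alternative decomposition, same cost.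

-- ===== PORT A =====
-- sequenceAlphabet = string.ascii_lowercase
def sequenceAlphabet : String := "abcdefghijklmnopqrstuvwxyz"

def sequentialLetters (password : String) : Int :=
  ((PySem.List.pyRange 0 (PySem.Str.len password) 1).foldl
    (fun countLetters i =>
      -- letters += password[i : i + 3]  (letters reset to "" each iteration)
      let letters := PySem.Str.slice password (some i) (some (i + 3))
      if PySem.Str.isIn letters sequenceAlphabet = true ∧ PySem.Str.len letters = 3
      then countLetters + 1 else countLetters)
    0) * 3 * -1

-- ===== PORT B =====
-- 97 <= ord(ch) <= 122
def lowerB (c : Char) : Bool := 97 ≤ c.toNat && c.toNat ≤ 122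

-- run-length update for one character (ord comparisons, exactly as in Source B)
def seqStep (prev : Option Char) (run : Int) (ch : Char) : Int :=
  if lowerB ch && (match prev with
      | some p => lowerB p && (ch.toNat == p.toNat + 1)
      | none => false)
  then run + 1
  else if lowerB ch then 1 else 0

-- the 'for ch in password' loop of Source B, state (prev, run, count)
def seqGo : List Char → Option Char → Int → Int → Int
  | [], _, _, count => count
  | ch :: rest, prev, run, count =>
      let run' := seqStep prev run ch
      seqGo rest (some ch) run' (if 3 ≤ run' then count + 1 else count)

def sequentialLetters_alt (password : String) : Int :=
  seqGo password.toList none 0 0 * 3 * -1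

-- ===== PRECONDITION & SPEC =====
def Spec_sequentialLetters (password : String) (out : Int) : Prop := out = sequentialLetters_alt password
instance (password : String) (out : Int) : Decidable (Spec_sequentialLetters password out) := by unfold Spec_sequentialLetters; infer_instance

-- ===== CLAIM (what is proved, stated in full; the proofs are below) =====
def Claim_equal_sequentialLetters : Prop := ∀ (password : String), Dom_sequentialLetters password → Spec_sequentialLetters password (sequentialLetters password)

-- ===== LEMMAS AND PROOFS =====

-- 'c extends p': both lowercase and ord c = ord p + 1 (seqStep's extension test, some-case)
abbrev extP (p c : Char) : Prop :=
  (97 ≤ c.toNat ∧ c.toNat ≤ 122) ∧ (97 ≤ p.toNat ∧ p.toNat ≤ 122 ∧ c.toNat = p.toNat + 1)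

-- window count: number of length-3 windows that are ascending lowercase chains
def wc : List Char → Int
  | a :: b :: c :: rest => (if extP a b ∧ extP b c then 1 else 0) + wc (b :: c :: rest)
  | _ => 0

theorem az_len : sequenceAlphabet.toList.length = 26 := by decide

theorem az_get : ∀ k, k < 26 → (sequenceAlphabet.toList[k]?).map Char.toNat = some (97 + k) := by decide

theorem az_take : ∀ k, k < 24 →
    (sequenceAlphabet.toList.drop k).take 3 = [Char.ofNat (97+k), Char.ofNat (98+k), Char.ofNat (99+k)] := by decide

-- characterisation of A's window test on a 3-character window
theorem infix3 (a b c : Char) :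
    [a, b, c] <:+: sequenceAlphabet.toList ↔ extP a b ∧ extP b c := by
  constructor
  · rintro ⟨s, t, hst⟩
    have h26 := az_len
    have hlen := congrArg List.length hst
    simp only [List.length_append, List.length_cons] at hlen
    have hk : s.length ≤ 23 := by omega
    have hget : ∀ j, j < 3 → (sequenceAlphabet.toList[s.length + j]?) = [a,b,c][j]? := by
      intro j hj
      rw [← hst, List.append_assoc, List.getElem?_append_right (by omega),
        List.getElem?_append_left (by simp; omega)]
      congr 1; omega
    have ha := az_get (s.length + 0) (by omega)
    have hb := az_get (s.length + 1) (by omega)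
    have hc := az_get (s.length + 2) (by omega)
    rw [hget 0 (by omega)] at ha
    rw [hget 1 (by omega)] at hb
    rw [hget 2 (by omega)] at hc
    simp at ha hb hc
    refine ⟨⟨?_, ?_, ?_⟩, ?_, ?_, ?_⟩ <;> omega
  · rintro ⟨⟨hb1, ha1⟩, hc1, hb2⟩
    set k : Nat := a.toNat - 97 with hkdef
    have hk : k < 24 := by omega
    have hwin : (sequenceAlphabet.toList.drop k).take 3 = [a, b, c] := by
      rw [az_take k hk]
      have h97 : 97 + k = a.toNat := by omega
      have h98 : 98 + k = b.toNat := by omega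
      have h99 : 99 + k = c.toNat := by omega
      rw [h97, h98, h99, Char.ofNat_toNat, Char.ofNat_toNat, Char.ofNat_toNat]
    rw [← hwin]
    exact ((sequenceAlphabet.toList.drop k).take_prefix 3).isInfix.trans
      (sequenceAlphabet.toList.drop_suffix k).isInfix

-- A's per-index test, stated on the character list
abbrev winP (l : List Char) (k : Nat) : Prop :=
  ((l.drop k).take 3) <:+: sequenceAlphabet.toList ∧ ((l.drop k).take 3).length = 3

theorem countP_windows_eq_wc : ∀ l : List Char,
    ((List.range l.length).countP (fun k => decide (winP l k)) : Int) = wc l := by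
  intro l
  induction l with
  | nil => simp [wc]
  | cons a t ih =>
    have hcnt : ((List.range (a :: t).length).countP (fun k => decide (winP (a :: t) k)) : Int) =
        (if winP (a :: t) 0 then (1:Int) else 0) + wc t := by
      rw [List.length_cons, List.range_succ_eq_map, List.countP_cons, List.countP_map]
      have hsh : ((List.range t.length).countP ((fun k => decide (winP (a :: t) k)) ∘ Nat.succ)) =
          (List.range t.length).countP (fun k => decide (winP t k)) := by
        apply List.countP_congr
        intro k _
        simp [Function.comp, winP]
      rw [hsh]
      push_cast
      rw [ih]
      by_cases h : winP (a :: t) 0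
      · rw [if_pos h, if_pos (by exact_mod_cast decide_eq_true h)]; ring
      · rw [if_neg h, if_neg (by simp [h])]; ring
    rw [hcnt]
    rcases t with _ | ⟨b, t2⟩
    · have hw : ¬ winP [a] 0 := by simp [winP]
      rw [if_neg hw]
      simp [wc]
    rcases t2 with _ | ⟨c, r⟩
    · have hw : ¬ winP [a, b] 0 := by simp [winP]
      rw [if_neg hw]
      simp [wc]
    · have h0 : winP (a :: b :: c :: r) 0 ↔ (extP a b ∧ extP b c) := by
        simp only [winP, List.drop_zero, List.take_succ_cons, List.take_zero]
        rw [infix3]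
        simp
      rw [show wc (a :: b :: c :: r) = (if extP a b ∧ extP b c then 1 else 0) + wc (b :: c :: r) from rfl]
      by_cases h : extP a b ∧ extP b c
      · rw [if_pos h, if_pos (h0.mpr h)]
      · rw [if_neg h, if_neg (fun hw => h (h0.mp hw))]

-- seqGo's count accumulator is additive
theorem seqGo_add : ∀ (l : List Char) (p : Option Char) (r c : Int),
    seqGo l p r c = c + seqGo l p r 0 := by
  intro l
  induction l with
  | nil => intro p r c; simp [seqGo]
  | cons ch rest ih =>
    intro p r c
    simp only [seqGo]
    rw [ih (some ch) (seqStep p r ch) (if 3 ≤ seqStep p r ch then c + 1 else c),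
        ih (some ch) (seqStep p r ch) (if 3 ≤ seqStep p r ch then (0:Int) + 1 else 0)]
    split <;> ring

-- triples straddling the boundary: one if the first char of l extends b and the run is already ≥ 2
def straddle (l : List Char) (b : Char) (r : Int) : Int :=
  match l with
  | c1 :: _ => if extP b c1 ∧ 2 ≤ r then 1 else 0
  | [] => 0

theorem lowerB_iff (c : Char) : lowerB c = true ↔ (97 ≤ c.toNat ∧ c.toNat ≤ 122) := by
  simp [lowerB]

theorem cond_iff (b c : Char) :
    (lowerB c && (lowerB b && (c.toNat == b.toNat + 1))) = true ↔ extP b c := by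
  simp [lowerB, extP, and_assoc]

theorem seqStep_some (b : Char) (r : Int) (c : Char) :
    seqStep (some b) r c = if extP b c then r + 1 else if 97 ≤ c.toNat ∧ c.toNat ≤ 122 then 1 else 0 := by
  show (if (lowerB c && (lowerB b && (c.toNat == b.toNat + 1))) = true then r + 1
        else if lowerB c = true then 1 else 0) = _
  by_cases h : extP b c
  · rw [if_pos ((cond_iff b c).mpr h), if_pos h]
  · rw [if_neg (fun hb => h ((cond_iff b c).mp hb)), if_neg h]
    by_cases h2 : 97 ≤ c.toNat ∧ c.toNat ≤ 122
    · rw [if_pos ((lowerB_iff c).mpr h2), if_pos h2]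
    · rw [if_neg (fun hb => h2 ((lowerB_iff c).mp hb)), if_neg h2]

theorem seqStep_none (r : Int) (c : Char) :
    seqStep none r c = if 97 ≤ c.toNat ∧ c.toNat ≤ 122 then 1 else 0 := by
  show (if (lowerB c && false) = true then r + 1 else if lowerB c = true then 1 else 0) = _
  rw [Bool.and_false, if_neg (by simp)]
  by_cases h2 : 97 ≤ c.toNat ∧ c.toNat ≤ 122
  · rw [if_pos ((lowerB_iff c).mpr h2), if_pos h2]
  · rw [if_neg (fun hb => h2 ((lowerB_iff c).mp hb)), if_neg h2]

-- main invariant for B's scan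
theorem seqGo_spec : ∀ (l : List Char) (b : Char) (r : Int), 0 ≤ r →
    ((97 ≤ b.toNat ∧ b.toNat ≤ 122) → 1 ≤ r) →
    seqGo l (some b) r 0 = wc (b :: l) + straddle l b r := by
  intro l
  induction l with
  | nil => intro b r _ _; simp [seqGo, wc, straddle]
  | cons c1 t ih =>
    intro b r hr hlow
    have hstep := seqStep_some b r c1
    set r1 := seqStep (some b) r c1 with hr1
    have hr1nn : 0 ≤ r1 := by rw [hstep]; split_ifs <;> omega
    have hr1low : (97 ≤ c1.toNat ∧ c1.toNat ≤ 122) → 1 ≤ r1 := by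
      intro hc1; rw [hstep]
      split_ifs with h1 h2 <;> first | omega | exact absurd hc1 h2
    have hr1two : 2 ≤ r1 ↔ (extP b c1 ∧ 1 ≤ r) := by
      rw [hstep]
      by_cases h1 : extP b c1
      · rw [if_pos h1]
        exact ⟨fun h => ⟨h1, by omega⟩, fun ⟨_, h⟩ => by omega⟩
      · rw [if_neg h1]
        refine iff_of_false ?_ (fun hx => h1 hx.1)
        split_ifs <;> omega
    have hr1three : 3 ≤ r1 ↔ (extP b c1 ∧ 2 ≤ r) := by
      rw [hstep]
      by_cases h1 : extP b c1
      · rw [if_pos h1]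
        exact ⟨fun h => ⟨h1, by omega⟩, fun ⟨_, h⟩ => by omega⟩
      · rw [if_neg h1]
        refine iff_of_false ?_ (fun hx => h1 hx.1)
        split_ifs <;> omega
    show seqGo t (some c1) r1 (if 3 ≤ r1 then (0:Int) + 1 else 0) = wc (b :: c1 :: t) + straddle (c1 :: t) b r
    rw [seqGo_add, ih c1 r1 hr1nn hr1low]
    have hA : (if 3 ≤ r1 then (0:Int) + 1 else 0) = straddle (c1 :: t) b r := by
      show _ = if extP b c1 ∧ 2 ≤ r then (1:Int) else 0
      by_cases h : extP b c1 ∧ 2 ≤ r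
      · rw [if_pos (hr1three.mpr h), if_pos h]; ring
      · rw [if_neg (fun h3 => h (hr1three.mp h3)), if_neg h]
    have hB : wc (b :: c1 :: t) = wc (c1 :: t) + straddle t c1 r1 := by
      rcases t with _ | ⟨c2, t'⟩
      · simp [wc, straddle]
      · rw [show wc (b :: c1 :: c2 :: t') = (if extP b c1 ∧ extP c1 c2 then 1 else 0) + wc (c1 :: c2 :: t') from rfl]
        show _ = wc (c1 :: c2 :: t') + if extP c1 c2 ∧ 2 ≤ r1 then (1:Int) else 0
        have hiff : (extP c1 c2 ∧ 2 ≤ r1) ↔ (extP b c1 ∧ extP c1 c2) := by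
          rw [hr1two]
          constructor
          · rintro ⟨h1, h2, _⟩; exact ⟨h2, h1⟩
          · rintro ⟨h1, h2⟩
            exact ⟨h2, h1, hlow ⟨h1.2.1, h1.2.2.1⟩⟩
        by_cases h : extP b c1 ∧ extP c1 c2
        · rw [if_pos h, if_pos (hiff.mpr h)]; ring
        · rw [if_neg h, if_neg (fun hx => h (hiff.mp hx))]; ring
    rw [hA, hB]; ring

theorem seqGo_eq_wc : ∀ l : List Char, seqGo l none 0 0 = wc l := by
  intro l
  rcases l with _ | ⟨c1, t⟩
  · simp [seqGo, wc]
  · have hstep := seqStep_none 0 c1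
    show seqGo t (some c1) (seqStep none 0 c1) (if 3 ≤ seqStep none 0 c1 then (0:Int) + 1 else 0) = wc (c1 :: t)
    have h3 : ¬ 3 ≤ seqStep none 0 c1 := by rw [hstep]; split_ifs <;> omega
    rw [if_neg h3, seqGo_spec t c1 (seqStep none 0 c1)
      (by rw [hstep]; split_ifs <;> omega)
      (by intro h; rw [hstep, if_pos h])]
    have hz : straddle t c1 (seqStep none 0 c1) = 0 := by
      rcases t with _ | ⟨c2, t'⟩
      · rfl
      · show (if extP c1 c2 ∧ 2 ≤ seqStep none 0 c1 then (1:Int) else 0) = 0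
        rw [if_neg]
        rintro ⟨_, h2⟩
        rw [hstep] at h2; revert h2; split_ifs <;> omega
    rw [hz]; ring

-- A's foldl equals the window countP on the character list
theorem a_count_eq (s : String) :
    sequentialLetters s = ((List.range s.toList.length).countP (fun k => decide (winP s.toList k)) : Int) * 3 * -1 := by
  unfold sequentialLetters
  congr 1
  congr 1
  have hfold := PySem.List.foldl_ite_add_one
    (p := fun i : Int => PySem.Str.isIn (PySem.Str.slice s (some i) (some (i + 3))) sequenceAlphabet = true ∧
          PySem.Str.len (PySem.Str.slice s (some i) (some (i + 3))) = 3)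
    (l := PySem.List.pyRange 0 (PySem.Str.len s) 1) (a := (0:Int))
  rw [hfold]
  rw [zero_add]
  congr 1
  rw [PySem.List.pyRange_one]
  rw [List.countP_map]
  have hlen : ((PySem.Str.len s - 0).toNat) = s.toList.length := by
    simp [PySem.Str.len_eq, PySem.Chars.len_eq]
  rw [hlen]
  apply List.countP_congr
  intro k _
  simp only [Function.comp]
  have hslice : (PySem.Str.slice s (some ((0:Int) + (k:Int))) (some ((0:Int) + (k:Int) + 3))).toList
      = (s.toList.drop k).take 3 := by
    rw [PySem.Str.toList_slice]
    rw [PySem.Chars.slice_eq_listSlice]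
    have h1 : ((0:Int) + (k:Int)) = (k:Int) := by ring
    rw [h1]
    have h2 : ((k:Int) + 3) = ((k:Int) + ((3:Nat):Int)) := by norm_num
    rw [h2, PySem.List.slice_natCast_add]
  have hIn : (PySem.Str.isIn (PySem.Str.slice s (some ((0:Int) + (k:Int))) (some ((0:Int) + (k:Int) + 3))) sequenceAlphabet = true)
      ↔ ((s.toList.drop k).take 3 <:+: sequenceAlphabet.toList) := by
    rw [PySem.Str.isIn_iff_infix, hslice]
  have hLen : (PySem.Str.len (PySem.Str.slice s (some ((0:Int) + (k:Int))) (some ((0:Int) + (k:Int) + 3))) = 3)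
      ↔ (((s.toList.drop k).take 3).length = 3) := by
    simp only [PySem.Str.len_eq, PySem.Chars.len_eq, hslice]
    constructor <;> intro h <;> exact_mod_cast h
  have hmain : (PySem.Str.isIn (PySem.Str.slice s (some ((0:Int) + (k:Int))) (some ((0:Int) + (k:Int) + 3))) sequenceAlphabet = true ∧
      PySem.Str.len (PySem.Str.slice s (some ((0:Int) + (k:Int))) (some ((0:Int) + (k:Int) + 3))) = 3) ↔ winP s.toList k := by
    constructor
    · rintro ⟨h1, h2⟩; exact ⟨hIn.mp h1, hLen.mp h2⟩
    · rintro ⟨h1, h2⟩; exact ⟨hIn.mpr h1, hLen.mpr h2⟩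
  simp only [decide_eq_true_eq]
  exact hmain

-- ===== VERDICT (by name: the statement is the Claim_ definition above) =====
theorem sequentialLetters_spec : Claim_equal_sequentialLetters := by
  intro password _
  unfold Spec_sequentialLetters sequentialLetters_alt
  rw [a_count_eq, countP_windows_eq_wc, seqGo_eq_wc]
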